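-- pv_equiv track=rewrite | github.com/zhanjun717/STGAT | net_struct.py | get_tc_graph_struc
-- ===== SOURCE A (Python) =====
-- def get_tc_graph_struc(temporal_len):
--     struc_map = {}
--     teporal_list = list(range(0,temporal_len))
--
--     for tp in teporal_list:  # 遍历所有特征
--         if tp not in struc_map:  # 构建结构映射字典struc_map
--             struc_map[tp] = []
--
--         for other_tp in teporal_list:  # 遍历所有特征
--             if other_tp is not tp and other_tp < tp:  # 将除当前节点以外的所有节点保存到struc_map中，struc_map字典保存所有节点与其他节点的连接关系
--                 struc_map[tp].append(other_tp)
--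
--     return struc_map
-- ===== SOURCE B (Python) =====
-- def get_tc_graph_struc(temporal_len):
--     return {tp: list(range(tp)) for tp in range(temporal_len)}
-- ===== Notes on version B (the rewrite author's own statement) =====
-- stated objective: simpler
-- what changed: Replaced the nested scan over the whole temporal list (filtering by other_tp < tp, plus redundant identity and membership checks) with a direct dict comprehension computing each index's predecessor list as range(tp).
import Mathlib
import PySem

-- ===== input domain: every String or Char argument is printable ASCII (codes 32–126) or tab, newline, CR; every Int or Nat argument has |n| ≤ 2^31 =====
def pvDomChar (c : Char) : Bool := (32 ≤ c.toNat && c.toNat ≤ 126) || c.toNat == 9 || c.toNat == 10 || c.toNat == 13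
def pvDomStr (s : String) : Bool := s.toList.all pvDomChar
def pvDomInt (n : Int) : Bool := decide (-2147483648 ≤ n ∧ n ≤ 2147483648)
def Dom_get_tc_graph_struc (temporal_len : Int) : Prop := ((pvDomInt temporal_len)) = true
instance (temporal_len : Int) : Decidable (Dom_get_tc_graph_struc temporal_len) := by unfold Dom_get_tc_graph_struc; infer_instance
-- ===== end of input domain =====

-- B replaces A's nested scan over the full temporal list with a direct dict
-- comprehension mapping each index tp to list(range(tp)); same return value, simpler.

-- ===== PORT A =====
-- one outer-loop body of A: membership check + empty-list init, then the inner scan.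
-- Python's 'other_tp is not tp' compares identity of elements of ONE list, which for
-- elements drawn from the same list coincides with equality; ported as ≠ (exact here).
def tcBody (tl : List Int) (d : PySem.Dict Int (List Int)) (tp : Int) :
    PySem.Dict Int (List Int) :=
  let d1 := if d.contains tp then d else d.insert tp []
  tl.foldl (fun d other =>
    if other ≠ tp ∧ other < tp then d.modify tp [] (fun v => v ++ [other]) else d) d1

def get_tc_graph_struc (temporal_len : Int) : List (Int × List Int) :=
  let tl := PySem.List.pyRange 0 temporal_len 1
  (tl.foldl (tcBody tl) PySem.Dict.empty).items

-- ===== PORT B =====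
def get_tc_graph_struc_alt (temporal_len : Int) : List (Int × List Int) :=
  (PySem.List.pyRange 0 temporal_len 1).map (fun tp => (tp, PySem.List.pyRange 0 tp 1))

-- ===== PRECONDITION & SPEC =====
def Spec_get_tc_graph_struc (temporal_len : Int) (out : List (Int × List Int)) : Prop := out = get_tc_graph_struc_alt temporal_len
instance (temporal_len : Int) (out : List (Int × List Int)) : Decidable (Spec_get_tc_graph_struc temporal_len out) := by unfold Spec_get_tc_graph_struc; infer_instance

-- ===== CLAIM (what is proved, stated in full; the proofs are below) =====
def Claim_equal_get_tc_graph_struc : Prop := ∀ (temporal_len : Int), Dom_get_tc_graph_struc temporal_len → Spec_get_tc_graph_struc temporal_len (get_tc_graph_struc temporal_len)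

-- ===== LEMMAS AND PROOFS =====

-- re-inserting a key's current value changes nothing (keys unique)
lemma insert_getD_self (d : PySem.Dict Int (List Int)) (k : Int)
    (hc : d.contains k = true) (hn : d.keys.Nodup) :
    d.insert k (d.getD k []) = d := by
  apply PySem.Dict.ext
  rw [PySem.Dict.items_insert_of_contains _ _ hc]
  conv_rhs => rw [← List.map_id d.items]
  apply List.map_congr_left
  intro p hp
  by_cases hk : p.1 = k
  · subst hk
    have hmem : (p.1, p.2) ∈ d.items := by simpa using hp
    have hg := PySem.Dict.getD_of_mem_items _ hmem hn ([] : List Int)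
    simp [hg]
  · simp [hk]

-- two successive inserts at the same key collapse to the last
lemma insert_insert_self (d : PySem.Dict Int (List Int)) (k : Int) (v w : List Int) :
    (d.insert k v).insert k w = d.insert k w := by
  apply PySem.Dict.ext
  by_cases hc : d.contains k = true
  · rw [PySem.Dict.items_insert_of_contains _ _ (by simp [PySem.Dict.contains_insert_self]),
      PySem.Dict.items_insert_of_contains _ _ hc,
      PySem.Dict.items_insert_of_contains _ _ hc, List.map_map]
    apply List.map_congr_left
    intro p _
    by_cases hk : p.1 = k <;> simp [hk]
  · have hc' : d.contains k = false := by simpa using hc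
    rw [PySem.Dict.items_insert_of_contains _ _ (by simp [PySem.Dict.contains_insert_self]),
      PySem.Dict.items_insert_of_not_contains _ _ hc',
      PySem.Dict.items_insert_of_not_contains _ _ hc', List.map_append]
    have hpk : ∀ p ∈ d.items, p.1 ≠ k := by
      intro p hp hk
      have hkmem : k ∈ d.keys := by
        have := List.mem_map_of_mem (f := Prod.fst) hp
        rw [hk] at this
        simpa [PySem.Dict.keys] using this
      have := (PySem.Dict.contains_iff_mem_keys d k).mpr hkmem
      rw [hc'] at this
      exact Bool.noConfusion this
    have hmap : d.items.map (fun p => if p.1 = k then (k, w) else p) = d.items := by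
      conv_rhs => rw [← List.map_id d.items]
      exact List.map_congr_left (fun p hp => by simp [hpk p hp])
    simp [hmap]

-- A's inner loop appends exactly the elements strictly below tp, in order
lemma inner_fold (tp : Int) (l : List Int) (d : PySem.Dict Int (List Int))
    (hc : d.contains tp = true) (hn : d.keys.Nodup) :
    l.foldl (fun d o => if o ≠ tp ∧ o < tp then d.modify tp [] (fun v => v ++ [o]) else d) d
    = d.insert tp (d.getD tp [] ++ l.filter (fun o => decide (o ≠ tp ∧ o < tp))) := by
  induction l generalizing d with
  | nil => simp [insert_getD_self d tp hc hn]
  | cons o l ih =>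
    by_cases h : o ≠ tp ∧ o < tp
    · have hmod : d.modify tp [] (fun v => v ++ [o]) = d.insert tp (d.getD tp [] ++ [o]) := by
        simp [PySem.Dict.modify]
      rw [List.foldl_cons, if_pos h, hmod,
        ih _ (by simp [PySem.Dict.contains_insert_self]) (PySem.Dict.nodup_keys_insert _ _ _ hn),
        PySem.Dict.getD_insert_self, insert_insert_self]
      simp [h, List.append_assoc]
    · rw [List.foldl_cons, if_neg h, ih d hc hn]
      simp [h]
  
-- the elements of range(0,n) strictly below tp are exactly range(0,tp)
lemma filter_pyRange (n tp : Int) (h0 : 0 ≤ tp) (hn : tp ≤ n) :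
    (PySem.List.pyRange 0 n 1).filter (fun o => decide (o ≠ tp ∧ o < tp))
    = PySem.List.pyRange 0 tp 1 := by
  have h1 : (PySem.List.pyRange 0 tp 1).filter (fun o => decide (o ≠ tp ∧ o < tp))
      = PySem.List.pyRange 0 tp 1 := by
    apply List.filter_eq_self.mpr
    intro o ho
    have := (PySem.List.mem_pyRange_one).mp ho
    simp; omega
  have h2 : (PySem.List.pyRange tp n 1).filter (fun o => decide (o ≠ tp ∧ o < tp)) = [] := by
    apply List.filter_eq_nil_iff.mpr
    intro o ho
    have := (PySem.List.mem_pyRange_one).mp ho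
    simp; omega
  rw [PySem.List.pyRange_one_append 0 tp n h0 hn, List.filter_append, h1, h2, List.append_nil]

-- invariant of A's outer loop: after processing range(0,m) the dict is B's map
lemma outer_fold (n : Int) (m : Nat) (hm : (m : Int) ≤ n) :
    (PySem.List.pyRange 0 m 1).foldl (tcBody (PySem.List.pyRange 0 n 1)) PySem.Dict.empty
    = PySem.Dict.mk ((PySem.List.pyRange 0 m 1).map (fun tp => (tp, PySem.List.pyRange 0 tp 1))) := by
  induction m with
  | zero => simp [PySem.List.pyRange_one_eq_nil (by omega : (0:Int) ≤ 0)]; rfl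
  | succ m ih =>
    have hsplit : PySem.List.pyRange 0 ((m : Int) + 1) 1
        = PySem.List.pyRange 0 m 1 ++ [(m : Int)] :=
      PySem.List.pyRange_one_succ_right (by omega)
    have hkeys : (PySem.Dict.mk ((PySem.List.pyRange 0 (m : Int) 1).map
        (fun tp => (tp, PySem.List.pyRange 0 tp 1)))).keys = PySem.List.pyRange 0 (m : Int) 1 := by
      simp [PySem.Dict.keys, Function.comp_def]
    have hnotmem : ((m : Int) ∈ PySem.List.pyRange 0 (m : Int) 1) = False := by
      simp [PySem.List.mem_pyRange_one]
    have hcont : (PySem.Dict.mk ((PySem.List.pyRange 0 (m : Int) 1).map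
        (fun tp => (tp, PySem.List.pyRange 0 tp 1)))).contains (m : Int) = false := by
      rw [PySem.Dict.contains_eq_decide_mem_keys, hkeys]
      simp [hnotmem]
    have hnodup : (PySem.Dict.mk ((PySem.List.pyRange 0 (m : Int) 1).map
        (fun tp => (tp, PySem.List.pyRange 0 tp 1)))).keys.Nodup := by
      rw [hkeys]; exact PySem.List.nodup_pyRange_one 0 (m : Int)
    push_cast [hsplit]
    rw [List.foldl_append, ih (by omega)]
    set d := PySem.Dict.mk ((PySem.List.pyRange 0 (m : Int) 1).map
        (fun tp => (tp, PySem.List.pyRange 0 tp 1))) with hd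
    show tcBody (PySem.List.pyRange 0 n 1) d (m : Int) = _
    unfold tcBody
    rw [if_neg (by simp [hcont])]
    rw [inner_fold _ _ _ (by simp [PySem.Dict.contains_insert_self])
        (PySem.Dict.nodup_keys_insert _ _ _ hnodup)]
    rw [PySem.Dict.getD_insert_self, filter_pyRange n (m : Int) (by omega) (by omega),
      insert_insert_self]
    apply PySem.Dict.ext
    rw [PySem.Dict.items_insert_of_not_contains _ _ hcont]
    simp [hd]

-- ===== VERDICT (by name: the statement is the Claim_ definition above) =====
theorem get_tc_graph_struc_spec : Claim_equal_get_tc_graph_struc := by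
  intro n _
  unfold Spec_get_tc_graph_struc get_tc_graph_struc get_tc_graph_struc_alt
  show ((PySem.List.pyRange 0 n 1).foldl (tcBody (PySem.List.pyRange 0 n 1)) PySem.Dict.empty).items
    = (PySem.List.pyRange 0 n 1).map (fun tp => (tp, PySem.List.pyRange 0 tp 1))
  by_cases hn : 0 ≤ n
  · have := outer_fold n n.toNat (by omega)
    rw [show ((n.toNat : Int)) = n by omega] at this
    rw [this]
  · rw [PySem.List.pyRange_one_eq_nil (by omega)]
    rfl
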